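-- pv_equiv track=rewrite | github.com/pypi-data/pypi-mirror-396 | packages/ion-CSP/ion_csp-2.2.6-py3-none-any.whl/ion_CSP/identify_molecules.py | format_molecule_output
-- ===== SOURCE A (Python) =====
-- def format_molecule_output(molecule_dict):
--     """
--     统一格式化分子输出，按照固定顺序排列元素
--
--     params:
--         molecule_dict: 分子字典，包含元素和计数
--     returns:
--         格式化后的字符串元组（分子表示，总原子数）
--     """
--     # 定义固定顺序的元素
--     fixed_order = ["C", "N", "O", "H"]
--
--     # 计算总原子数
--     total_atoms = sum(molecule_dict.values())
--
--     # 构建输出字符串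
--     output = []
--     # 先处理固定顺序的元素
--     for element in fixed_order:
--         if element in molecule_dict:
--             output.append(f"{element}{molecule_dict[element]}")
--
--     # 处理其他元素（按字母顺序排序以保证一致性）
--     other_elements = [elem for elem in molecule_dict if elem not in fixed_order]
--     for element in sorted(other_elements):
--         output.append(f"{element}{molecule_dict[element]}")
--
--     formatted_output = "".join(output)
--     return formatted_output, total_atoms
-- ===== SOURCE B (Python) =====
-- def format_molecule_output(molecule_dict):
--     """Single ranked sort: fixed elements C,N,O,H first (via a rank prefix), then the rest alphabetically."""
--     _RANK = {"C": "0", "N": "1", "O": "2", "H": "3"}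
--     ordered = sorted(molecule_dict, key=lambda e: _RANK.get(e, "4") + e)
--     formatted = "".join(f"{e}{molecule_dict[e]}" for e in ordered)
--     return formatted, sum(molecule_dict.values())
-- ===== Notes on version B (the rewrite author's own statement) =====
-- stated objective: simpler
-- what changed: A's two ordering passes (a loop over the fixed elements C,N,O,H plus a separate sort of the leftover elements) are replaced by one sort of all keys under a rank-prefixed key, followed by a single format-and-join pass.
import Mathlib
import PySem

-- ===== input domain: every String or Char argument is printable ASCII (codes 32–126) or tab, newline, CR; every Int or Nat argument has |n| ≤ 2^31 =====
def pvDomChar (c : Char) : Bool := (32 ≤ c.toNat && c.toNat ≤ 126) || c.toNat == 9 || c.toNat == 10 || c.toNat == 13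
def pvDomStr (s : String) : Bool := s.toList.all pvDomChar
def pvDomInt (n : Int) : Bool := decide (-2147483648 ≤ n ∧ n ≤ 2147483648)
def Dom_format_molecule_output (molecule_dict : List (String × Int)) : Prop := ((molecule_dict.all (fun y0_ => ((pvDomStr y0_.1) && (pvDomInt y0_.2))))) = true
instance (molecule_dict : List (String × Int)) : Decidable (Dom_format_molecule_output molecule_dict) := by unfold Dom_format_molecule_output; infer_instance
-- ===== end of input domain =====

-- B replaces A's two ordering passes (fixed-order loop, then a sort of the leftover elements)
-- with ONE sort of all keys under a rank-prefixed key; objective: simpler. Same return value.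

-- ===== PORT A =====
def format_molecule_output (molecule_dict : List (String × Int)) : String × Int :=
  let fixed_order : List String := ["C", "N", "O", "H"]
  let d := PySem.Dict.ofList molecule_dict
  let total_atoms : Int := (PySem.Dict.values d).sum
  let output : List String :=
    fixed_order.foldl (fun acc element =>
      if PySem.Dict.contains d element then
        acc ++ [element ++ PySem.Int.toStr (PySem.Dict.getD d element 0)]
      else acc) []
  let other_elements : List String :=
    (PySem.Dict.keys d).filter (fun elem => !fixed_order.contains elem)
  let output : List String :=
    (PySem.List.sorted other_elements (fun x => x) false).foldl
      (fun acc element => acc ++ [element ++ PySem.Int.toStr (PySem.Dict.getD d element 0)]) output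
  (PySem.Str.join "" output, total_atoms)

-- ===== PORT B =====
-- Source B's sort key  _RANK.get(e, "4") + e
def pvRankKey (e : String) : String :=
  (if e = "C" then "0" else if e = "N" then "1" else if e = "O" then "2"
   else if e = "H" then "3" else "4") ++ e

def format_molecule_output_alt (molecule_dict : List (String × Int)) : String × Int :=
  let d := PySem.Dict.ofList molecule_dict
  let ordered := PySem.List.sorted (PySem.Dict.keys d) pvRankKey false
  (PySem.Str.join "" (ordered.map (fun e => e ++ PySem.Int.toStr (PySem.Dict.getD d e 0))),
   (PySem.Dict.values d).sum)

-- ===== PRECONDITION & SPEC =====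
def Spec_format_molecule_output (molecule_dict : List (String × Int)) (out : String × Int) : Prop := out = format_molecule_output_alt molecule_dict
instance (molecule_dict : List (String × Int)) (out : String × Int) : Decidable (Spec_format_molecule_output molecule_dict out) := by unfold Spec_format_molecule_output; infer_instance

-- ===== CLAIM (what is proved, stated in full; the proofs are below) =====
def Claim_equal_format_molecule_output : Prop := ∀ (molecule_dict : List (String × Int)), Dom_format_molecule_output molecule_dict → Spec_format_molecule_output molecule_dict (format_molecule_output molecule_dict)

-- ===== LEMMAS AND PROOFS =====

theorem pvRankKey_other (e : String) (h : (!(["C","N","O","H"] : List String).contains e) = true) :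
    pvRankKey e = "4" ++ e := by
  simp at h
  simp [pvRankKey, h.1, h.2.1, h.2.2.1, h.2.2.2]

theorem pvRankKey_fixed_lt (a s : String) (ha : a ∈ (["C","N","O","H"] : List String)) :
    pvRankKey a < "4" ++ s := by
  fin_cases ha <;> rw [String.lt_iff_toList_lt] <;> simp [pvRankKey] <;>
    exact List.lex_eq_true_iff_lt.mp rfl

theorem pvRankKey_mono (a b : String) (hab : a < b)
    (ha : (!(["C","N","O","H"] : List String).contains a) = true)
    (hb : (!(["C","N","O","H"] : List String).contains b) = true) :
    pvRankKey a < pvRankKey b := by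
  simp at ha hb
  rw [pvRankKey, pvRankKey]
  simp [ha.1, ha.2.1, ha.2.2.1, ha.2.2.2, hb.1, hb.2.1, hb.2.2.1, hb.2.2.2]
  rw [String.lt_iff_toList_lt] at *
  simpa using hab

-- the single ranked sort splits into A's two segments
theorem sorted_rankKey_split (keys : List String) (hnd : keys.Nodup) :
    PySem.List.sorted keys pvRankKey false =
      ((["C","N","O","H"] : List String).filter (fun e => keys.contains e)) ++
        PySem.List.sorted (keys.filter (fun e => !(["C","N","O","H"] : List String).contains e))
          (fun x => x) false := by
  have hS : (PySem.List.sorted (keys.filter (fun e => !(["C","N","O","H"] : List String).contains e))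
      (fun x => x) false).Perm (keys.filter (fun e => !(["C","N","O","H"] : List String).contains e)) :=
    PySem.List.sorted_perm _ _ _
  have hndS : (PySem.List.sorted (keys.filter (fun e => !(["C","N","O","H"] : List String).contains e))
      (fun x => x) false).Nodup := hS.nodup_iff.mpr (hnd.filter _)
  apply PySem.List.sorted_eq_of_perm_of_pairwise_lt
  · -- the two segments together permute the key list
    have h2 : ((["C","N","O","H"] : List String).filter (fun e => keys.contains e)).Perm
        (keys.filter (fun e => (["C","N","O","H"] : List String).contains e)) := by
      rw [List.perm_ext_iff_of_nodup (List.Nodup.filter _ (by decide)) (hnd.filter _)]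
      intro a
      simp [List.mem_filter, and_comm]
    exact (h2.append hS).trans (List.filter_append_perm _ keys)
  · -- strictly increasing under pvRankKey
    rw [List.pairwise_append]
    refine ⟨?_, ?_, ?_⟩
    · refine List.Pairwise.sublist List.filter_sublist ?_
      simp only [pvRankKey, String.lt_iff_toList_lt]
      decide
    · have hle := PySem.List.sorted_pairwise
        (xs := keys.filter (fun e => !(["C","N","O","H"] : List String).contains e))
        (key := fun x => x)
      refine List.Pairwise.imp_of_mem ?_ (hle.and hndS)
      intro a b ha hb hab
      exact pvRankKey_mono a b (lt_of_le_of_ne hab.1 hab.2)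
        (List.mem_filter.mp (hS.mem_iff.mp ha)).2 (List.mem_filter.mp (hS.mem_iff.mp hb)).2
    · intro a ha b hb
      rw [pvRankKey_other b (List.mem_filter.mp (hS.mem_iff.mp hb)).2]
      exact pvRankKey_fixed_lt a b (List.mem_of_mem_filter ha)

-- ===== VERDICT (by name: the statement is the Claim_ definition above) =====
theorem format_molecule_output_spec : Claim_equal_format_molecule_output := by
  intro md _
  unfold Spec_format_molecule_output format_molecule_output format_molecule_output_alt
  have hnd : (PySem.Dict.ofList md).keys.Nodup := PySem.Dict.nodup_keys_ofList md
  dsimp only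
  rw [PySem.List.foldl_append_if, PySem.List.foldl_append_singleton_eq_map]
  rw [List.nil_append, ← List.map_append]
  have hc : ((["C","N","O","H"] : List String).filter
        (fun e => PySem.Dict.contains (PySem.Dict.ofList md) e)) =
      ((["C","N","O","H"] : List String).filter
        (fun e => (PySem.Dict.keys (PySem.Dict.ofList md)).contains e)) := by
    apply List.filter_congr
    intro x _
    simp [PySem.Dict.contains_eq_decide_mem_keys]
  rw [hc, ← sorted_rankKey_split _ hnd]
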